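-- pv_equiv track=rewrite | github.com/Barkat444/HireMeMaybe | questionnaire_handler.py | _fuzzy_match_option
-- ===== SOURCE A (Python) =====
-- def _fuzzy_match_option(answer, options):
--     """Find the best matching option from a list given an answer string.
--     Tries exact match first, then substring, then word overlap."""
--     if not options:
--         return None
--
--     answer_lower = answer.lower().strip()
--
--     for opt in options:
--         if opt.lower().strip() == answer_lower:
--             return opt
--
--     for opt in options:
--         if answer_lower in opt.lower() or opt.lower() in answer_lower:
--             return opt
--
--     best_match = None
--     best_score = 0
--     answer_words = set(answer_lower.split())
--     for opt in options:
--         opt_words = set(opt.lower().split())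
--         overlap = len(answer_words & opt_words)
--         if overlap > best_score:
--             best_score = overlap
--             best_match = opt
--
--     return best_match if best_score > 0 else options[0]
-- ===== SOURCE B (Python) =====
-- def _fuzzy_match_option(answer, options):
--     """Single pass over options maintaining the first exact match, the first
--     substring match, and the best word-overlap candidate; pick in that order."""
--     if not options:
--         return None
--
--     answer_lower = answer.lower().strip()
--     answer_words = set(answer_lower.split())
--
--     exact = None
--     substr = None
--     best_match = None
--     best_score = 0
--     for opt in options:
--         low = opt.lower()
--         if exact is None and low.strip() == answer_lower:
--             exact = opt
--         if substr is None and (answer_lower in low or low in answer_lower):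
--             substr = opt
--         overlap = len(answer_words & set(low.split()))
--         if overlap > best_score:
--             best_score = overlap
--             best_match = opt
--
--     if exact is not None:
--         return exact
--     if substr is not None:
--         return substr
--     return best_match if best_score > 0 else options[0]
-- ===== Notes on version B (the rewrite author's own statement) =====
-- stated objective: alternative
-- what changed: A's three separate scans over options (exact match, substring match, word-overlap maximum) are fused into one loop that simultaneously tracks the first exact match, the first substring match and the best-overlap candidate, with the priority applied once after the loop.
import Mathlib
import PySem

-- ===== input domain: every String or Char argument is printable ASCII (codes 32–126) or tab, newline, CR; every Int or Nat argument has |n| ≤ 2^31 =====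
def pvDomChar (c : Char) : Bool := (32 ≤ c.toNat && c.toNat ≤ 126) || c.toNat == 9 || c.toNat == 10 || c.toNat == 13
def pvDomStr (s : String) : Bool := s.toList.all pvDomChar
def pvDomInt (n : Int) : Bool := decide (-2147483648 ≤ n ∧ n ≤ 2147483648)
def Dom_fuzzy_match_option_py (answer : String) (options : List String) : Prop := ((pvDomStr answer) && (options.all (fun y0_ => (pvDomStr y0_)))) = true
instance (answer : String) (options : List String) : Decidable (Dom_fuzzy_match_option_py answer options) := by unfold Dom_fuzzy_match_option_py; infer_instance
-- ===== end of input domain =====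

-- B fuses A's three scans over `options` into one loop that tracks the first exact
-- match, the first substring match and the best word-overlap candidate (objective:
-- alternative single-pass decomposition; same asymptotic cost).


-- ===== PORT A =====
-- A-side helper: the body of A's third loop ("best word overlap" accumulator).
def fuzzyStepA (answer_words : PySem.Set String) (st : Option String × Int) (opt : String) : Option String × Int :=
  let opt_words : PySem.Set String := PySem.Set.ofList (PySem.Str.split₀ (PySem.Str.lower opt))
  let overlap := PySem.Set.len (PySem.Set.inter answer_words opt_words)
  if overlap > st.2 then (some opt, overlap) else st

-- A: scan for first exact match, then first substring match, then max word overlap.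
def fuzzy_match_option_py (answer : String) (options : List String) : Option String :=
  if options = [] then none
  else
    let answer_lower := PySem.Str.strip (PySem.Str.lower answer)
    match options.find? (fun opt => PySem.Str.strip (PySem.Str.lower opt) == answer_lower) with
    | some opt => some opt
    | none =>
      match options.find? (fun opt =>
          PySem.Str.isIn answer_lower (PySem.Str.lower opt) ||
          PySem.Str.isIn (PySem.Str.lower opt) answer_lower) with
      | some opt => some opt
      | none =>
        let answer_words : PySem.Set String := PySem.Set.ofList (PySem.Str.split₀ answer_lower)
        let st := options.foldl (fuzzyStepA answer_words) (none, 0)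
        if st.2 > 0 then st.1 else PySem.List.pyGet? options 0

-- ===== PORT B =====
-- B-side helper: the body of B's single fused loop over (exact, substr, best_match, best_score).
def fuzzyStepB (answer_lower : String) (answer_words : PySem.Set String)
    (st : Option String × Option String × Option String × Int) (opt : String) :
    Option String × Option String × Option String × Int :=
  let low := PySem.Str.lower opt
  let e := match st.1 with
    | some x => some x
    | none => if PySem.Str.strip low == answer_lower then some opt else none
  let su := match st.2.1 with
    | some x => some x
    | none => if PySem.Str.isIn answer_lower low || PySem.Str.isIn low answer_lower then some opt else none
  let overlap := PySem.Set.len (PySem.Set.inter answer_words (PySem.Set.ofList (PySem.Str.split₀ low)))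
  if overlap > st.2.2.2 then (e, su, some opt, overlap) else (e, su, st.2.2.1, st.2.2.2)

-- B: one fold over options, then pick exact, else substring, else best overlap / options[0].
def fuzzy_match_option_py_alt (answer : String) (options : List String) : Option String :=
  if options = [] then none
  else
    let answer_lower := PySem.Str.strip (PySem.Str.lower answer)
    let answer_words : PySem.Set String := PySem.Set.ofList (PySem.Str.split₀ answer_lower)
    let st := options.foldl (fuzzyStepB answer_lower answer_words) (none, none, none, 0)
    match st.1 with
    | some e => some e
    | none =>
      match st.2.1 with
      | some su => some su
      | none => if st.2.2.2 > 0 then st.2.2.1 else PySem.List.pyGet? options 0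

-- ===== PRECONDITION & SPEC =====
def Spec_fuzzy_match_option_py (answer : String) (options : List String) (out : Option String) : Prop := out = fuzzy_match_option_py_alt answer options
instance (answer : String) (options : List String) (out : Option String) : Decidable (Spec_fuzzy_match_option_py answer options out) := by unfold Spec_fuzzy_match_option_py; infer_instance

-- ===== CLAIM (what is proved, stated in full; the proofs are below) =====
def Claim_equal_fuzzy_match_option_py : Prop := ∀ (answer : String) (options : List String), Dom_fuzzy_match_option_py answer options → Spec_fuzzy_match_option_py answer options (fuzzy_match_option_py answer options)

-- ===== LEMMAS AND PROOFS =====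

theorem pv_stepB_eval (al : String) (aw : PySem.Set String)
    (e s bm : Option String) (bs : Int) (x : String) :
    fuzzyStepB al aw (e, s, bm, bs) x =
    (if PySem.Set.len (PySem.Set.inter aw (PySem.Set.ofList (PySem.Str.split₀ (PySem.Str.lower x)))) > bs
     then ((match e with
            | some y => some y
            | none => if PySem.Str.strip (PySem.Str.lower x) == al then some x else none),
           (match s with
            | some y => some y
            | none => if PySem.Str.isIn al (PySem.Str.lower x) || PySem.Str.isIn (PySem.Str.lower x) al then some x else none),
           some x,
           PySem.Set.len (PySem.Set.inter aw (PySem.Set.ofList (PySem.Str.split₀ (PySem.Str.lower x)))))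
     else ((match e with
            | some y => some y
            | none => if PySem.Str.strip (PySem.Str.lower x) == al then some x else none),
           (match s with
            | some y => some y
            | none => if PySem.Str.isIn al (PySem.Str.lower x) || PySem.Str.isIn (PySem.Str.lower x) al then some x else none),
           bm, bs)) := rfl

theorem pv_stepA_eval (aw : PySem.Set String) (bm : Option String) (bs : Int) (x : String) :
    fuzzyStepA aw (bm, bs) x =
    (if PySem.Set.len (PySem.Set.inter aw (PySem.Set.ofList (PySem.Str.split₀ (PySem.Str.lower x)))) > bs
     then (some x, PySem.Set.len (PySem.Set.inter aw (PySem.Set.ofList (PySem.Str.split₀ (PySem.Str.lower x)))))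
     else (bm, bs)) := rfl

-- B's fused fold splits into A's two find?-scans and A's overlap fold.
theorem pv_fold_split (al : String) (aw : PySem.Set String) (l : List String)
    (e s bm : Option String) (bs : Int) :
    l.foldl (fuzzyStepB al aw) (e, s, bm, bs) =
    ((match e with
      | some x => some x
      | none => l.find? (fun opt => PySem.Str.strip (PySem.Str.lower opt) == al)),
     (match s with
      | some x => some x
      | none => l.find? (fun opt =>
          PySem.Str.isIn al (PySem.Str.lower opt) || PySem.Str.isIn (PySem.Str.lower opt) al)),
     l.foldl (fuzzyStepA aw) (bm, bs)) := by
  induction l generalizing e s bm bs with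
  | nil => cases e <;> cases s <;> rfl
  | cons x xs ih =>
    rw [List.foldl_cons, List.foldl_cons, pv_stepB_eval, pv_stepA_eval]
    by_cases h3 : PySem.Set.len (PySem.Set.inter aw (PySem.Set.ofList (PySem.Str.split₀ (PySem.Str.lower x)))) > bs
    · rw [if_pos h3, if_pos h3, ih]
      cases e <;> cases s <;>
        rcases Bool.eq_false_or_eq_true (PySem.Str.strip (PySem.Str.lower x) == al) with h1 | h1 <;>
        rcases Bool.eq_false_or_eq_true (PySem.Str.isIn al (PySem.Str.lower x) || PySem.Str.isIn (PySem.Str.lower x) al) with h2 | h2 <;>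
        simp only [List.find?_cons, h1, h2, reduceIte] <;> rfl
    · rw [if_neg h3, if_neg h3, ih]
      cases e <;> cases s <;>
        rcases Bool.eq_false_or_eq_true (PySem.Str.strip (PySem.Str.lower x) == al) with h1 | h1 <;>
        rcases Bool.eq_false_or_eq_true (PySem.Str.isIn al (PySem.Str.lower x) || PySem.Str.isIn (PySem.Str.lower x) al) with h2 | h2 <;>
        simp only [List.find?_cons, h1, h2, reduceIte] <;> rfl

-- ===== VERDICT (by name: the statement is the Claim_ definition above) =====
theorem fuzzy_match_option_py_spec : Claim_equal_fuzzy_match_option_py := by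
  intro answer options _
  unfold Spec_fuzzy_match_option_py fuzzy_match_option_py fuzzy_match_option_py_alt
  by_cases hnil : options = []
  · simp [hnil]
  · simp only [if_neg hnil]
    rw [pv_fold_split]
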